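/-
  THE CONTRACTS OF THE FRAME PIPELINE AND OF THE API (c/stb_vorbis_fixed.c, c/shim.c, c/start.S; design/CONTRACTS.md entries 8,
  18, 66, 67, 68, 76, 114, 115, 116):

      copy_frame                       the shim's copy of one decoded frame into OUT                         (shadow layer only)
      vorbis_finish_frame              FinishPre (= W3′) in, M7 again and the result `r` out
      vorbis_decode_initial            the mode number, W2's exact value set for the four window outputs
      vorbis_decode_packet             PROTECTED frame; W3 for (len, left, right) on success
      vorbis_pump_first_frame          PROTECTED frame; P5 → FB
      stb_vorbis_get_frame_float       PROTECTED frame; FB → FB, `outputs[c] = channel_buffers[c] + 4·left`, `left + r ≤ b1`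
      stb_vorbis_open_memory           PROTECTED frame; P2 → NULL, or FB for the arena copy (the TRANSPORT `*f = p`)
      decode_all                       PROTECTED frame; P1 → returned, the shadow layer as before
      put_header                       the shim's eight header words of OUT                                 (shadow layer only)
      _start_vorbis                    NOT a function: its statement is a `ReachVia` from the start state to `L.exit`
                                       (`start_vorbis.Reaches`, at the end of this file)

  NAMES. The `Spec`s are `Vorbis.Spec.<fn>.spec`; every auxiliary definition of this file lives in the namespace
  `Vorbis.Spec.Top` (`Top.DBlk`, `Top.W3Mem`, `Top.FrameOut` …): the other groups' files define helpers with the same short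
  names (`LiveBytes` in Mdct.lean, `Apart` in Codebook.lean), and the units of this file import those modules.

  THE CONVENTIONS OF THE DECODE-TIME SPECS OF THIS FILE (all ghosts are parameters of the `Spec`-valued function):
      len            the ghost length of the input (`inBlock len` = the `len` bytes at 200000H)
      A              the arena ghost (Vorbis/Arena.lean); `others` = Q0's list of live non-stack objects (`ArenaOK A others …`: AR6)
      Blk            the block predicate "is an allocated block" is NOT a ghost here: at decode time it is
                     `Top.DBlk len A` = `runBlk A (fixedBlocks len)` (Vorbis/Invariant/Blk.lean, "WHICH `Blk` WHEN") — so that the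
                     fixed objects are known to be allocated and off the stack, and a callee's abstract `Blk` can be instantiated
      frames         the active protected frames BELOW which the function runs (its callers'); a protected function pushes its own
      LiveSet others frames = `Asan.Live (stackObjs frames ++ others)`: the live set of the program points (Vorbis/State.lean §3)
      stored room    decode_all's two counters, carried by `Real.FB` (a callee does not look at them)
    pre   `ShadowPre others frames u` (the shadow layer, the clean stack ending at `rsp + 8`) ∧ the program point
          `DecodeInv others frames len A stored room ysz u.mem f` (Vorbis/Spec/DecodeInv.lean: `Real.FB …` ∧ SEP ∧ the hand-over
          carrier ∧ "the buffers are arena blocks" ∧ …; `ysz` = the named sizes of the `finalY` blocks, one more ghost)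
    post  the shadow layer again (`ShadowUntouched u.mem v.mem` for the two unprotected functions, which reach no allocator;
          `ShadowInv others frames v.rsp v.mem` for the protected ones: their net effect on the shadow of the stack is nil, and
          the temp blocks of the callees are released) ∧ the program point again ∧ SEP ∧ …
    writes  COARSE on purpose: the arena `[A.B, A.B + A.L)` — which contains `*f`, the sample buffers and the temp blocks — and,
          for a function that writes shadow bytes, the shadow region `[C00000H, E00000H)`; plus the caller's out-objects. What
          a caller needs to know about the arena and the shadow AFTER the call is in the postcondition (the invariant holds
          again), never in the footprint.
    Liveness: an OUT-POINTER is a live object of a caller's stack frame (`StackObj`: the one-object `LiveIn` of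
    Vorbis/Spec/Basic.lean, in the stack region); a BUFFER inside an allocated block is live BYTEWISE (`LiveBytes`: every byte is in
    the live set — what `Site` and `BlkLive` give).
-/
import Vorbis.Spec.Basic
import Vorbis.Spec.Common
import Vorbis.Spec.Runtime
import Vorbis.Spec.Leaves2
import Vorbis.Invariant
import Vorbis.StartShadow
import Vorbis.Spec.DecodeInv
namespace Vorbis.Spec
open X86 X86.User Asan

/-! ### 0. Shared vocabulary of this file (namespace `Vorbis.Spec.Top`) -/

namespace Top

/-- The shadow region as one span: the footprint clause of a function that writes shadow bytes (its own protected frame's,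
its callees', the arena's through arena_poison / arena_unpoison). What the shadow IS afterwards is said by the post's
`ShadowInv`. -/
def shadowAll : Span := ⟨0xC00000, 0xE00000⟩

/-- The arena as one span: the footprint clause of every decode-time function (the arena contains `*f`, the sample buffers, the
temp blocks and nothing else that is live). -/
def arenaSpan (A : Arena) : Span := ⟨A.B, A.B + A.L⟩

/- SH7 for the two tables of the image that the decoder reads as constants (`log2_4`, `range_list`): `Vorbis.Spec.Consts mem`
(Vorbis/Spec/Common.lean; it was `Consts` here). -/

end Top
open Top

/-! ### 1. `copy_frame` (the shim's) and `put_header` -/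

/-- **`copy_frame(rdi = dst, rsi = stored, rdx = room, rcx = chan, r8d = channels, r9d = n)`** (CONTRACTS 8; c/shim.c 26–40).
`0 ≤ stored ≤ room` (C `long`s); the `4·room` bytes at `dst` are live (OUT + 32); for every `c < channels`: the pointer
`chan[c]` (8 bytes at `chan + 8c`) is live and is not one of the bytes `dst[stored .. room)` that the function stores to
(CONTRACTS: "dst disjoint from those" — the pointer is RE-LOADED in every round), and, if `n > 0`, the `4·n` bytes it points to
are live. (`channels ≤ 16` of CONTRACTS is not needed: the loop bound is the argument.) Returns `stored'` with
`stored ≤ stored' ≤ room`; writes `dst[stored .. room)` at most, and its own 112 bytes of stack (six pushes, `sub rsp, 28H`, the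
return address of a check call, that routine's worst case); no shadow byte is written. The floats are opaque. -/
def copy_frame.spec (others : List Obj) (frames : List (Nat × FrameLayout)) : Spec where
  pre u :=
    ShadowPre others frames u ∧
    0 ≤ s64 (u.reg .rsi) ∧
    s64 (u.reg .rsi) ≤ s64 (u.reg .rdx) ∧
    LiveBytes others frames (u.reg .rdi).toNat (4 * (s64 (u.reg .rdx)).toNat) ∧
    (∀ c : Nat, (c : Int) < s32 (u.reg .r8) →
      LiveBytes others frames ((u.reg .rcx).toNat + 8 * c) 8 ∧
      ((u.reg .rcx).toNat + 8 * c + 8 ≤ (u.reg .rdi).toNat + 4 * (s64 (u.reg .rsi)).toNat ∨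
        (u.reg .rdi).toNat + 4 * (s64 (u.reg .rdx)).toNat ≤ (u.reg .rcx).toNat + 8 * c) ∧
      (0 < s32 (u.reg .r9) →
        LiveBytes others frames (u.mem.ptr ((u.reg .rcx).toNat + 8 * c)) (4 * (s32 (u.reg .r9)).toNat)))
  post u v :=
    ShadowUntouched u.mem v.mem ∧
    s64 (u.reg .rsi) ≤ s64 (v.reg .rax) ∧
    s64 (v.reg .rax) ≤ s64 (u.reg .rdx)
  frame := 112
  writes u :=
    [⟨(u.reg .rdi).toNat + 4 * (s64 (u.reg .rsi)).toNat, (u.reg .rdi).toNat + 4 * (s64 (u.reg .rdx)).toNat⟩]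

@[vspec] theorem copy_frame.spec_frame (others : List Obj) (frames : List (Nat × FrameLayout)) :
    (copy_frame.spec others frames).frame = 112 := id rfl

@[vspec] theorem copy_frame.spec_writes (others : List Obj) (frames : List (Nat × FrameLayout)) (u : State) :
    (copy_frame.spec others frames).writes u =
      [⟨(u.reg .rdi).toNat + 4 * (s64 (u.reg .rsi)).toNat,
        (u.reg .rdi).toNat + 4 * (s64 (u.reg .rdx)).toNat⟩] := id rfl

/-- **`put_header(rdi = hdr, esi, edx, ecx, r8d = status, err, channels, rate, r9 = frames, [rsp + 8] = stored)`** (CONTRACTS 9;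
c/shim.c 42–52): the 32 bytes at `hdr` are live (OUT's first 32 bytes: `cap ≥ 32` was tested by decode_all). Eight checked 4-byte
stores `hdr[0 .. 8)`; the values are of no interest to the proof. Writes `[hdr, hdr + 32)` and its own 80 bytes of stack (six
pushes, `sub rsp, 8`, the return address of a check call, that routine's worst case); no shadow byte. The seventh argument is
READ from the caller's frame (`[rsp + 40H]` after the prologue): above the entry stack pointer, inside the stack region. -/
def put_header.spec (others : List Obj) (frames : List (Nat × FrameLayout)) : Spec where
  pre u :=
    ShadowPre others frames u ∧
    LiveBytes others frames (u.reg .rdi).toNat 32 ∧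
    (u.reg .rsp).toNat + 16 ≤ 0x800000
  post u v :=
    ShadowUntouched u.mem v.mem
  frame := 80
  writes u := [⟨(u.reg .rdi).toNat, (u.reg .rdi).toNat + 32⟩]

@[vspec] theorem put_header.spec_frame (others : List Obj) (frames : List (Nat × FrameLayout)) :
    (put_header.spec others frames).frame = 80 := id rfl

@[vspec] theorem put_header.spec_writes (others : List Obj) (frames : List (Nat × FrameLayout)) (u : State) :
    (put_header.spec others frames).writes u = [⟨(u.reg .rdi).toNat, (u.reg .rdi).toNat + 32⟩] := id rfl

/-! ### 2. The decode-time program point of this file -/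

namespace Top

/-- **The block predicate of decode time**: the arena's setup blocks (the arena copy `*f` among them) and the fixed objects —
the input, the output, the six globals (Vorbis/Invariant/Blk.lean: "from P5 on"). It is `RunBlk A len` of Vorbis/Spec/Common.lean
(this file's argument order). -/
abbrev DBlk (len : Nat) (A : Arena) : Block → Prop := RunBlk A len

/- **THE FRAME BOUNDARY AS THE CONTRACTS OF THIS FILE STATE IT** is THE decode-time invariant
`Vorbis.Spec.DecodeInv others frames len A stored room ysz mem f` (Vorbis/Spec/DecodeInv.lean; it was `Top.DecodePt` here): the program
point `Real.FB` (INVARIANTS §5: `Env`, `VorbisOK f`, ADO, decode_all's counters) over the block predicate of decode time and the live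
set of the shadow layer, TOGETHER WITH what the unification left to the contracts: SEP; `*f` and every non-empty sample buffer are
setup blocks of the arena (why the FOOTPRINT of a decode-time function is the arena); the hand-over carrier `Hand` (the input, the
output, `*f` inside ONE live object each, the six globals as objects, the arena above the text, the fixed objects outside the
arena); SH7 for `log2_4` and `range_list` (`Consts`); FY1 with the sizes named (`ysz`: a ghost of every decode-time Spec; the
functions of this file only carry it). `f` is the arena copy. The step of every protected function of this file — the invariant
under another list of frames and a changed stack / shadow — is `DecodeInv.carry`; the facts that follow (`h.objLive`, `h.offStack`,
`h.books`, `h.log2` …) are theorems of Vorbis/Spec/DecodeInv.lean. -/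

/-- Every block of the decode-time predicate lies off the stack region: a setup block by AR1x, a fixed object by inspection. -/
theorem DBlk.offStack {len : Nat} {A : Arena} {others : List Obj} {mem : Mem} {f : Nat} (hA : ArenaOK A others mem f)
    (hlen : len ≤ 0x1FF000) {B : Block} (hB : DBlk len A B) : B.base + B.size ≤ 0x700000 ∨ 0x800000 ≤ B.base := by
  rcases hB with hs | hm
  · exact hA.blk_off_stack hs
  · exact fixed_off_stack len hlen B hm

/-- The windows of `*f` that every allocator call leaves alone: everything except `setup_memory_required` `[8, 12)` and
`setup_offset` / `temp_offset` `[128, 136)` (`Vorbis.Spec.allocWins` of Vorbis/Spec/Alloc.lean, S1: setup_malloc adds the rounded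
size to `setup_memory_required`, so `ObjSame` — which contains `[8, 12)` — is FALSE across vorbis_alloc). -/
def allocWins : Wins := [(0, 8), (12, 128), (136, 1808)]

/-- **`VorbisOK` over an allocator call, in the form that is TRUE of setup_malloc / vorbis_alloc** (`Real.VorbisOK.frame` asks for
`ObjSame`): no group of the invariant reads `[8, 12)` or `[128, 136)`. stb_vorbis_open_memory carries `VorbisOK(&p)` over
`vorbis_alloc(&p)` with it, before the transport `Real.P5.of_move`. -/
theorem vorbisOK_frame_alloc {len : Nat} {Blk : Block → Prop} {mem mem' : Mem} {f : Nat} (h : Real.VorbisOK len Blk mem f)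
    (he : ObjEq allocWins mem f mem' f) (hk : ∀ B, ConfigOK.Reads mem f B → B.Kept mem mem') :
    Real.VorbisOK len Blk mem' f :=
  Real.VorbisOK.of_config ((Real.VorbisOK.config h).transfer (he.sub (by decide)) hk (fun _ _ hb => hb))
    (h.bits.transfer (he.sub (by decide)) ⟨h.bits.OB1, h.bits.OB1a⟩ h.bits.OBR h.bits.S2)
    (h.buffers.M7.transfer (he.sub (by decide))) (h.w1.transfer (he.sub (by decide)))

/-- Two byte ranges do not meet. -/
def RangesApart (p n q m : Nat) : Prop := p + n ≤ q ∨ q + m ≤ p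

/-- The 4-byte objects at the addresses of the list are pairwise apart. -/
def Apart4 (ps : List Nat) : Prop := ps.Pairwise (fun p q => RangesApart p 4 q 4)

/-- What `vorbis_finish_frame` returns (eax, as a signed number `r`) for the entry value `pl` of `previous_length`: 0 if there was
no previous frame or no window of that length; else `min(right, len) − left` (line 3554: `if (len < right) right = len`). In
every case `0 ≤ r` and `left + r ≤ right ≤ b1` under `FinishPre` (`FinishPre.result`). -/
def FinishResult (pl len left right r : Int) : Prop :=
  (pl = 0 → r = 0) ∧ (r = 0 ∨ r = (if len < right then len else right) - left)

/-- **What vorbis_decode_initial has stored when it returns 1**: the mode number `i = *mode` with `0 ≤ i < mode_count` (the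
explicit test of line 3199: `i ≥ mode_count → return FALSE`; `0 ≤ i` from get_bits' range), and for `n` = the block size of that
mode (`blocksize_1` if `mode_config[i].blockflag ≠ 0`, else `blocksize_0`) W2's EXACT VALUE SET for the four window outputs
(Vorbis/State/Window.lean: `W2.short`, `W2.long prev next`). -/
def DecodedMode (mem : Mem) (f pls ple prs pre pm : Nat) : Prop :=
  0 ≤ mem.i32 pm ∧
  mem.i32 pm < stb_vorbis.mode_count mem f ∧
  W2 (stb_vorbis.blocksize_0 mem f) (stb_vorbis.blocksize_1 mem f)
    (if Mode.blockflag mem (stb_vorbis.mode_config_at f (mem.i32 pm).toNat) = 0 then stb_vorbis.blocksize_0 mem f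
      else stb_vorbis.blocksize_1 mem f)
    (mem.i32 pls) (mem.i32 ple) (mem.i32 prs) (mem.i32 pre)

/-- **W3 about the three `int` objects `*len`, `*p_left`, `*p_right`** (INVARIANTS §3.7, Vorbis/State/Window.lean): `n` (the
block size of the decoded mode) and `re` (`right_end`) are internal to vorbis_decode_packet. `W3.finishPre` turns it into
vorbis_finish_frame's precondition (`W3At`). -/
def W3Mem (mem : Mem) (f pLen pLeft pRight : Nat) : Prop :=
  ∃ n re : Int, W3 (stb_vorbis.blocksize_1 mem f) n (mem.i32 pLeft) (mem.i32 pRight) (mem.i32 pLen) re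

/-- W3 in memory gives the precondition of vorbis_finish_frame about the three locals. -/
theorem W3Mem.w3At {mem : Mem} {f pLen pLeft pRight : Nat} (h : W3Mem mem f pLen pLeft pRight) :
    W3At mem f pLen pLeft pRight := by
  obtain ⟨n, re, hw⟩ := h
  exact hw.finishPre

/-- **What stb_vorbis_get_frame_float has stored when it returns `r ≠ 0`** (`pc` = `channels`, `po` = `output`, NULL allowed):
`*channels = f->channels`, `*output = f->outputs` (`f + 1000`), and for some `left` with `0 ≤ left` and `left + r ≤ b1`:
`outputs[c] = channel_buffers[c] + 4·left` for every `c < channels` — so the `4·r` bytes at `outputs[c]` lie inside the `4·b1`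
bytes of the channel buffer (M6): copy_frame's precondition. -/
def FrameOut (mem : Mem) (f pc po : Nat) (r : Int) : Prop :=
  (pc ≠ 0 → mem.i32 pc = stb_vorbis.channels mem f) ∧
  (po ≠ 0 → mem.ptr po = f + Off.stb_vorbis.outputs) ∧
  ∃ left : Nat, (left : Int) + r ≤ stb_vorbis.blocksize_1 mem f ∧
    ∀ c : Nat, (c : Int) < stb_vorbis.channels mem f →
      stb_vorbis.outputs mem f c = stb_vorbis.channel_buffers mem f c + 4 * left

end Top

/-! ### 3. `vorbis_finish_frame` -/

/-- **`vorbis_finish_frame(rdi = f, esi = len, edx = left, ecx = right)`** (CONTRACTS 18; stb_vorbis_fixed.c 3508–3559). At a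
frame boundary (`DecodeInv`: OB1, HD1, HD3, M3, M6, M7 are in `VorbisOK f`; "blocks disjoint from `*f`" is SEP) with W3′ =
`FinishPre b1 len left right` for the three `int` arguments: the four index bounds of Vorbis/State/Window.lean
(`FinishPre.mix_chan / mix_prev / save_read / save_write`, `mix_win`) are the check sites. Afterwards the frame boundary holds
again — in particular M7 for the new `previous_length = len − right` (`FinishPre.prev_len`, `M7Range.of_finish`), or for the old
one when `get_window` returned NULL and NOTHING was written — `*f` is the same outside the decode-time holes, and eax is
`Top.FinishResult`. Writes `f.previous_length`, `f.samples_output`, floats of `channel_buffers[i]` and `previous_window[i]`: all in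
the arena; its own 144 bytes of stack (six pushes, `sub rsp, 28H`, the return address of the call of get_window, its 48 bytes);
no shadow byte. Float contents are opaque. -/
def vorbis_finish_frame.spec (others : List Obj) (frames : List (Nat × FrameLayout)) (len : Nat) (A : Arena)
    (stored room : Int) (ysz : Nat → Nat) : Spec where
  pre u :=
    ShadowPre others frames u ∧
    DecodeInv others frames len A stored room ysz u.mem (u.reg .rdi).toNat ∧
    FinishPre (stb_vorbis.blocksize_1 u.mem (u.reg .rdi).toNat) (s32 (u.reg .rsi)) (s32 (u.reg .rdx))
      (s32 (u.reg .rcx))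
  post u v :=
    ShadowUntouched u.mem v.mem ∧
    DecodeInv others frames len A stored room ysz v.mem (u.reg .rdi).toNat ∧
    DecodeSame (u.reg .rdi).toNat u.mem v.mem ∧
    Top.FinishResult (stb_vorbis.previous_length u.mem (u.reg .rdi).toNat) (s32 (u.reg .rsi)) (s32 (u.reg .rdx))
      (s32 (u.reg .rcx)) (s32 (v.reg .rax)) ∧
    (v.reg .rax).toNat < 2 ^ 32
  frame := 144
  writes _ := [Top.arenaSpan A]

@[vspec] theorem vorbis_finish_frame.spec_frame (others : List Obj) (frames : List (Nat × FrameLayout)) (len : Nat) (A : Arena)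
    (stored room : Int) (ysz : Nat → Nat) : (vorbis_finish_frame.spec others frames len A stored room ysz).frame = 144 := id rfl

@[vspec] theorem vorbis_finish_frame.spec_writes (others : List Obj) (frames : List (Nat × FrameLayout)) (len : Nat) (A : Arena)
    (stored room : Int) (ysz : Nat → Nat) (u : State) :
    (vorbis_finish_frame.spec others frames len A stored room ysz).writes u = [⟨A.B, A.B + A.L⟩] := id rfl

/-! ### 4. `vorbis_decode_initial` -/

/-- **`vorbis_decode_initial(rdi = f, rsi = p_left_start, rdx = p_left_end, rcx = p_right_start, r8 = p_right_end, r9 = mode)`**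
(CONTRACTS 66; stb_vorbis_fixed.c 3176–3230). At a frame boundary (`Bits f`, HD3, MD1, MD2 are in `VorbisOK f`; SH7 for `log2_4`
is `DecodeInv.log2`), the five out-pointers live 4-byte objects of the callers' stack frames, pairwise apart (they are disjoint
from `*f` and the arena because they are stack objects: `m->blockflag` and `f->blocksize_0` are RE-READ after the stores to them).
Returns 0 or 1 in eax (the upper half of rax is maybe_start_packet's on one of the FALSE exits: nothing is said of it); always: the
frame boundary again, `*f` the same outside the decode-time holes,
`channel_buffer_start = channel_buffer_end = 0`; if 1: `Top.DecodedMode`. Termination (the `retry:` loop and the drain loop) by the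
paging measure μ of the callees' progress clauses. Writes fields of `*f` (in the arena) and the five objects; 448 bytes of stack
(six pushes, `sub rsp, 28H`, a return address, get_bits' 352 = its own 48 + the 304 of one level of recursion: S2's finding,
CONTRACTS' index says 400); no shadow byte. -/
def vorbis_decode_initial.spec (others : List Obj) (frames : List (Nat × FrameLayout)) (len : Nat) (A : Arena)
    (stored room : Int) (ysz : Nat → Nat) : Spec where
  pre u :=
    ShadowPre others frames u ∧
    DecodeInv others frames len A stored room ysz u.mem (u.reg .rdi).toNat ∧
    StackObj others frames (u.reg .rsi).toNat 4 ∧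
    StackObj others frames (u.reg .rdx).toNat 4 ∧
    StackObj others frames (u.reg .rcx).toNat 4 ∧
    StackObj others frames (u.reg .r8).toNat 4 ∧
    StackObj others frames (u.reg .r9).toNat 4 ∧
    Top.Apart4 [(u.reg .rsi).toNat, (u.reg .rdx).toNat, (u.reg .rcx).toNat, (u.reg .r8).toNat, (u.reg .r9).toNat]
  post u v :=
    ShadowUntouched u.mem v.mem ∧
    DecodeInv others frames len A stored room ysz v.mem (u.reg .rdi).toNat ∧
    DecodeSame (u.reg .rdi).toNat u.mem v.mem ∧
    stb_vorbis.channel_buffer_start v.mem (u.reg .rdi).toNat = 0 ∧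
    stb_vorbis.channel_buffer_end v.mem (u.reg .rdi).toNat = 0 ∧
    (s32 (v.reg .rax) = 0 ∨ s32 (v.reg .rax) = 1) ∧
    (s32 (v.reg .rax) = 1 →
      Top.DecodedMode v.mem (u.reg .rdi).toNat (u.reg .rsi).toNat (u.reg .rdx).toNat (u.reg .rcx).toNat (u.reg .r8).toNat
        (u.reg .r9).toNat)
  frame := 448
  writes u :=
    [Top.arenaSpan A,
     ⟨(u.reg .rsi).toNat, (u.reg .rsi).toNat + 4⟩, ⟨(u.reg .rdx).toNat, (u.reg .rdx).toNat + 4⟩,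
     ⟨(u.reg .rcx).toNat, (u.reg .rcx).toNat + 4⟩, ⟨(u.reg .r8).toNat, (u.reg .r8).toNat + 4⟩,
     ⟨(u.reg .r9).toNat, (u.reg .r9).toNat + 4⟩]

@[vspec] theorem vorbis_decode_initial.spec_frame (others : List Obj) (frames : List (Nat × FrameLayout)) (len : Nat)
    (A : Arena) (stored room : Int) (ysz : Nat → Nat) :
    (vorbis_decode_initial.spec others frames len A stored room ysz).frame = 448 := id rfl

@[vspec] theorem vorbis_decode_initial.spec_writes (others : List Obj) (frames : List (Nat × FrameLayout)) (len : Nat)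
    (A : Arena) (stored room : Int) (ysz : Nat → Nat) (u : State) :
    (vorbis_decode_initial.spec others frames len A stored room ysz).writes u =
      [⟨A.B, A.B + A.L⟩,
       ⟨(u.reg .rsi).toNat, (u.reg .rsi).toNat + 4⟩, ⟨(u.reg .rdx).toNat, (u.reg .rdx).toNat + 4⟩,
       ⟨(u.reg .rcx).toNat, (u.reg .rcx).toNat + 4⟩, ⟨(u.reg .r8).toNat, (u.reg .r8).toNat + 4⟩,
       ⟨(u.reg .r9).toNat, (u.reg .r9).toNat + 4⟩] := id rfl

/-! ### 5. `vorbis_decode_packet` (PROTECTED frame `Vorbis.Frames.vorbis_decode_packet`) -/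

/-- **`vorbis_decode_packet(rdi = f, rsi = len, rdx = p_left, rcx = p_right)`** (CONTRACTS 67; stb_vorbis_fixed.c 3478–3486).
At a frame boundary; the three out-pointers live 4-byte objects of the callers' stack frames, pairwise apart. PROTECTED: the
prologue poisons the red zones around `mode`, `left_end`, `right_end` (`ShadowInv.prologue_ra` with
`Vorbis.Frames.vorbis_decode_packet`; they become live objects of the frame list for the two callees), the single epilogue
zeroes them (`ShadowInv.epilogue_ra`): the shadow layer afterwards is that of the entry, with the same `others` (the temp blocks
of vorbis_decode_packet_rest's callees are released) — not `ShadowUntouched` (the arena's shadow was written). Afterwards the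
frame boundary again; eax ≠ 0 ⇒ W3 for `(*len, *p_left, *p_right)` (`Top.W3Mem`). eax = 0: vorbis_decode_initial returned 0, or
vorbis_decode_packet_rest did. Writes the arena, shadow bytes, the three objects; 4048 bytes of stack (184 of its own, a return
address, vorbis_decode_packet_rest's 3856). -/
def vorbis_decode_packet.spec (others : List Obj) (frames : List (Nat × FrameLayout)) (len : Nat) (A : Arena)
    (stored room : Int) (ysz : Nat → Nat) : Spec where
  pre u :=
    ShadowPre others frames u ∧
    DecodeInv others frames len A stored room ysz u.mem (u.reg .rdi).toNat ∧
    StackObj others frames (u.reg .rsi).toNat 4 ∧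
    StackObj others frames (u.reg .rdx).toNat 4 ∧
    StackObj others frames (u.reg .rcx).toNat 4 ∧
    Top.Apart4 [(u.reg .rsi).toNat, (u.reg .rdx).toNat, (u.reg .rcx).toNat]
  post u v :=
    ShadowInv others frames (v.reg .rsp).toNat v.mem ∧
    DecodeInv others frames len A stored room ysz v.mem (u.reg .rdi).toNat ∧
    (s32 (v.reg .rax) ≠ 0 →
      Top.W3Mem v.mem (u.reg .rdi).toNat (u.reg .rsi).toNat (u.reg .rdx).toNat (u.reg .rcx).toNat)
  frame := 4048
  writes u :=
    [Top.arenaSpan A, Top.shadowAll,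
     ⟨(u.reg .rsi).toNat, (u.reg .rsi).toNat + 4⟩, ⟨(u.reg .rdx).toNat, (u.reg .rdx).toNat + 4⟩,
     ⟨(u.reg .rcx).toNat, (u.reg .rcx).toNat + 4⟩]

@[vspec] theorem vorbis_decode_packet.spec_frame (others : List Obj) (frames : List (Nat × FrameLayout)) (len : Nat)
    (A : Arena) (stored room : Int) (ysz : Nat → Nat) :
    (vorbis_decode_packet.spec others frames len A stored room ysz).frame = 4048 := id rfl

@[vspec] theorem vorbis_decode_packet.spec_writes (others : List Obj) (frames : List (Nat × FrameLayout)) (len : Nat)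
    (A : Arena) (stored room : Int) (ysz : Nat → Nat) (u : State) :
    (vorbis_decode_packet.spec others frames len A stored room ysz).writes u =
      [⟨A.B, A.B + A.L⟩, ⟨0xC00000, 0xE00000⟩,
       ⟨(u.reg .rsi).toNat, (u.reg .rsi).toNat + 4⟩, ⟨(u.reg .rdx).toNat, (u.reg .rdx).toNat + 4⟩,
       ⟨(u.reg .rcx).toNat, (u.reg .rcx).toNat + 4⟩] := id rfl

/-! ### 6. `vorbis_pump_first_frame` (PROTECTED frame `Vorbis.Frames.vorbis_pump_first_frame`) -/

/-- **`vorbis_pump_first_frame(rdi = f)`** (CONTRACTS 76; stb_vorbis_fixed.c 3561–3568): `f` the arena copy, at a frame boundary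
(P5 is one: `Real.P5.fb`; `first_decode = 1` and `previous_length = 0` of CONTRACTS' precondition are not needed for safety).
PROTECTED: `len`, `right`, `left` are objects of its frame. Afterwards the frame boundary again (vorbis_finish_frame is called
only after a non-zero result, with W3 ⇒ W3′), the shadow layer as at entry; eax is not used by the caller. Writes the arena and
shadow bytes; 4176 bytes of stack (120 of its own, a return address, vorbis_decode_packet's 4048). -/
def vorbis_pump_first_frame.spec (others : List Obj) (frames : List (Nat × FrameLayout)) (len : Nat) (A : Arena)
    (stored room : Int) (ysz : Nat → Nat) : Spec where
  pre u :=
    ShadowPre others frames u ∧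
    DecodeInv others frames len A stored room ysz u.mem (u.reg .rdi).toNat
  post u v :=
    ShadowInv others frames (v.reg .rsp).toNat v.mem ∧
    DecodeInv others frames len A stored room ysz v.mem (u.reg .rdi).toNat
  frame := 4176
  writes _ := [Top.arenaSpan A, Top.shadowAll]

@[vspec] theorem vorbis_pump_first_frame.spec_frame (others : List Obj) (frames : List (Nat × FrameLayout)) (len : Nat)
    (A : Arena) (stored room : Int) (ysz : Nat → Nat) :
    (vorbis_pump_first_frame.spec others frames len A stored room ysz).frame = 4176 := id rfl

@[vspec] theorem vorbis_pump_first_frame.spec_writes (others : List Obj) (frames : List (Nat × FrameLayout)) (len : Nat)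
    (A : Arena) (stored room : Int) (ysz : Nat → Nat) (u : State) :
    (vorbis_pump_first_frame.spec others frames len A stored room ysz).writes u =
      [⟨A.B, A.B + A.L⟩, ⟨0xC00000, 0xE00000⟩] := id rfl

/-! ### 7. `stb_vorbis_get_frame_float` (PROTECTED frame `Vorbis.Frames.stb_vorbis_get_frame_float`) -/

/-- **`stb_vorbis_get_frame_float(rdi = f, rsi = channels, rdx = output)`** (CONTRACTS 68; stb_vorbis_fixed.c 5052–5073). At a
frame boundary; each of the two out-pointers NULL or a live object of a caller's stack frame (4 / 8 bytes), apart from each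
other. PROTECTED: `len`, `right`, `left` are objects of its frame. Returns `r ≥ 0` in eax (zero-extended). Afterwards the frame
boundary again, the shadow layer as at entry; `r ≠ 0` ⇒ `Top.FrameOut`. (`r = 0`: vorbis_decode_packet returned 0 and nothing but
`channel_buffer_start / _end` was stored, or vorbis_finish_frame returned 0.) Writes the arena (`outputs[c]`,
`channel_buffer_start / _end` are fields of `*f`), shadow bytes, the two objects; 4240 bytes of stack (184 of its own, a return
address, vorbis_decode_packet's 4048). -/
def stb_vorbis_get_frame_float.spec (others : List Obj) (frames : List (Nat × FrameLayout)) (len : Nat) (A : Arena)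
    (stored room : Int) (ysz : Nat → Nat) : Spec where
  pre u :=
    ShadowPre others frames u ∧
    DecodeInv others frames len A stored room ysz u.mem (u.reg .rdi).toNat ∧
    ((u.reg .rsi).toNat = 0 ∨ StackObj others frames (u.reg .rsi).toNat 4) ∧
    ((u.reg .rdx).toNat = 0 ∨ StackObj others frames (u.reg .rdx).toNat 8) ∧
    ((u.reg .rsi).toNat = 0 ∨ (u.reg .rdx).toNat = 0 ∨ Top.RangesApart (u.reg .rsi).toNat 4 (u.reg .rdx).toNat 8)
  post u v :=
    ShadowInv others frames (v.reg .rsp).toNat v.mem ∧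
    DecodeInv others frames len A stored room ysz v.mem (u.reg .rdi).toNat ∧
    0 ≤ s32 (v.reg .rax) ∧
    (v.reg .rax).toNat < 2 ^ 32 ∧
    (s32 (v.reg .rax) ≠ 0 →
      Top.FrameOut v.mem (u.reg .rdi).toNat (u.reg .rsi).toNat (u.reg .rdx).toNat (s32 (v.reg .rax)))
  frame := 4240
  writes u :=
    [Top.arenaSpan A, Top.shadowAll,
     ⟨(u.reg .rsi).toNat, (u.reg .rsi).toNat + 4⟩, ⟨(u.reg .rdx).toNat, (u.reg .rdx).toNat + 8⟩]

@[vspec] theorem stb_vorbis_get_frame_float.spec_frame (others : List Obj) (frames : List (Nat × FrameLayout)) (len : Nat)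
    (A : Arena) (stored room : Int) (ysz : Nat → Nat) :
    (stb_vorbis_get_frame_float.spec others frames len A stored room ysz).frame = 4240 := id rfl

@[vspec] theorem stb_vorbis_get_frame_float.spec_writes (others : List Obj) (frames : List (Nat × FrameLayout)) (len : Nat)
    (A : Arena) (stored room : Int) (ysz : Nat → Nat) (u : State) :
    (stb_vorbis_get_frame_float.spec others frames len A stored room ysz).writes u =
      [⟨A.B, A.B + A.L⟩, ⟨0xC00000, 0xE00000⟩,
       ⟨(u.reg .rsi).toNat, (u.reg .rsi).toNat + 4⟩, ⟨(u.reg .rdx).toNat, (u.reg .rdx).toNat + 8⟩] := id rfl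

/-! ### 8. `stb_vorbis_open_memory` (PROTECTED frame `Vorbis.Frames.stb_vorbis_open_memory`) -/

namespace Top

/-- The global `crc_table` as a span: the one image address the program stores to (crc32_init, called by start_decoder; CONTRACTS,
schema row `footprint`). -/
def crcSpan : Span :=
  ⟨Vorbis.Globals.crc_table.beg, Vorbis.Globals.crc_table.beg + Vorbis.Globals.crc_table.size⟩

/-- The arena of the harness as a span: `[800000H, C00000H)`. -/
def harnessArena : Span := ⟨0x800000, 0xC00000⟩

/-- The output buffer as a span: `[400000H, 700000H)`. -/
def outSpan : Span := ⟨0x400000, 0x700000⟩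

/-- **No live object lies in the arena of the harness, and none is an arena block** (the arena starts wholly poisoned): the
`hout` of `ArenaOK.init`, the last clause of vorbis_init's precondition. -/
def ArenaFree (others : List Obj) : Prop :=
  ∀ o, o ∈ others → o.kind ≠ .setup ∧ o.kind ≠ .temp ∧ (o.base + o.size ≤ 0x800000 ∨ 0xC00000 ≤ o.base)

/-- **The fixed objects are live** (P1 of INVARIANTS §5): the input, the output, the six registered globals, byte by byte
(`fixed_live` of the predicate layer); the input and the output moreover each inside ONE object (`ReaderEnv.inp`;
`StartDecoder.HandOK.inp` / `.out` of start_decoder's precondition), and the six globals as objects of `others` (SH5 in the form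
`ilog.spec` and do_floor ask for: `log2_4.obj ∈ others`; `HandOK.globals`). -/
structure FixedLive (len : Nat) (others : List Obj) (frames : List (Nat × FrameLayout)) : Prop where
  blk : BlkLive (listBlk (fixedBlocks len)) (LiveSet others frames)
  inp : 0 < len → LiveIn others frames IN len
  out : LiveIn others frames blockOUT.base blockOUT.size
  globals : ∀ o, o ∈ Vorbis.Globals.objs → o ∈ others

/-- **The shadow layer after a function that allocated arena blocks**: the live non-stack objects are now `others'` — none of
them in the image's text — the fixed objects are still live, the clean stack ends at `top` again. -/
structure ShadowGrown (len : Nat) (others' : List Obj) (frames : List (Nat × FrameLayout)) (top : Nat) (mem : Mem) : Prop where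
  inv : ShadowInv others' frames top mem
  fixed : FixedLive len others' frames
  offText : ∀ o, o ∈ others' → L.textHi ≤ o.base

end Top

/-- **`stb_vorbis_open_memory(rdi = data, esi = len, rdx = error, rcx = alloc)`** (CONTRACTS 114; stb_vorbis_fixed.c 5104–5133,
FIX 19). Point P2: `data` = IN = 200000H (so the dead `data == NULL` exit is not entered), `0 ≤ len ≤ 1FF000H`; `error` (4 bytes)
and `alloc` (16 bytes) live objects of the caller's stack frame, apart, `*alloc = {800000H, 400000H}` (8-aligned: FIX 19's
misaligned-buffer branch is not taken, but it is live code: AR1's `B % 8 = 0` is a fact the code checks); the fixed objects live;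
no live object in the arena; SH7 for `log2_4` and `range_list` (`Consts`). PROTECTED: the stack object `p` (1808 bytes at `base + 48` of a 7C8H-byte frame) is
a live object of the frame list for vorbis_init, start_decoder, vorbis_alloc, memcpy's source and the failing vorbis_deinit
(`DeinitOK(&p)` from SD.ERR); the TRANSPORT `*f = p` is `Real.P5.of_move` with `Move` = memcpy's `Copied` + `SameExcept` of the
target; when the function returns, the stack object leaves the block predicate: `Real.VorbisOK.reblk`.
Afterwards the shadow layer holds for some `others'` (the old objects and the arena's blocks) with the frame popped (all five
exits share the epilogue). rax = 0: no more (SD.ERR: nothing of the arena is promised or needed). rax = f′ ≠ 0: the frame boundary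
for the arena copy f′ (`DecodeInv` with the arena ghost `A` of the harness's buffer and some sizes `ysz` of the `finalY` blocks), counters 0 0. `*error` holds 0, 3 or
`p.error`: a value nobody relies on. Writes the arena, shadow bytes, `crc_table` (crc32_init), `*error`; 6208 bytes of stack (2024
of its own, a return address, vorbis_pump_first_frame's 4176). -/
def stb_vorbis_open_memory.spec (others : List Obj) (frames : List (Nat × FrameLayout)) (len : Nat) : Spec where
  pre u :=
    ShadowPre others frames u ∧
    u.reg .rdi = 0x200000 ∧
    s32 (u.reg .rsi) = (len : Int) ∧
    len ≤ 0x1FF000 ∧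
    StackObj others frames (u.reg .rdx).toNat 4 ∧
    StackObj others frames (u.reg .rcx).toNat 16 ∧
    Top.RangesApart (u.reg .rdx).toNat 4 (u.reg .rcx).toNat 16 ∧
    u.mem.u64 (u.reg .rcx).toNat = 0x800000 ∧
    u.mem.u32 ((u.reg .rcx).toNat + 8) = 0x400000 ∧
    Top.FixedLive len others frames ∧
    Top.ArenaFree others ∧
    Consts u.mem
  post _ v :=
    ∃ others' : List Obj,
      Top.ShadowGrown len others' frames (v.reg .rsp).toNat v.mem ∧
      (v.reg .rax = 0 ∨
        ∃ (A : Arena) (ysz : Nat → Nat), A.B = 0x800000 ∧ A.L = 0x400000 ∧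
          DecodeInv others' frames len A 0 0 ysz v.mem (v.reg .rax).toNat)
  frame := 6208
  writes u := [Top.harnessArena, Top.shadowAll, Top.crcSpan, ⟨(u.reg .rdx).toNat, (u.reg .rdx).toNat + 4⟩]

@[vspec] theorem stb_vorbis_open_memory.spec_frame (others : List Obj) (frames : List (Nat × FrameLayout)) (len : Nat) :
    (stb_vorbis_open_memory.spec others frames len).frame = 6208 := id rfl

@[vspec] theorem stb_vorbis_open_memory.spec_writes (others : List Obj) (frames : List (Nat × FrameLayout)) (len : Nat)
    (u : State) :
    (stb_vorbis_open_memory.spec others frames len).writes u =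
      [⟨0x800000, 0xC00000⟩, ⟨0xC00000, 0xE00000⟩, ⟨0x121c00, 0x122000⟩,
       ⟨(u.reg .rdx).toNat, (u.reg .rdx).toNat + 4⟩] := id rfl

/-! ### 9. `decode_all` (PROTECTED frame `Vorbis.Frames.decode_all`) -/

/-- **`decode_all(rdi = in, esi = len, rdx = out, rcx = cap, r8 = arena, r9d = arena_len)`** (CONTRACTS 115; c/shim.c 58–101).
Point P1 with the parameter values of the start file: `in` = 200000H, `0 ≤ len ≤ 1FF000H`, `out` = 400000H, `cap` = 300000H
(PINNED by the start file, `Vorbis.paramWord`: the `cap < 32` exit is not entered, and `room = (cap − 32) / 4` = 786424, so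
`32 + 4·room = cap`: copy_frame's `dst[stored .. room)` is inside OUT), `arena` = 800000H, `arena_len` = 400000H; the fixed objects
live, nothing live in the arena, SH7 for `log2_4` and `range_list`. PROTECTED: `error`, `ch`, `chan`, `a` are objects of its frame. The frame loop
runs at most `len` times (measure `len − k`, independent of the decoder), at the frame boundary of the arena copy with
`0 ≤ stored ≤ room`. Returns 32 (open failed) or `32 + 4·stored`. Afterwards the shadow layer holds for some `others'` with
the frame popped. Writes OUT, the arena, shadow bytes, `crc_table`; 6448 bytes of stack (232 of its own at the call of
stb_vorbis_open_memory, a return address, that function's 6208). -/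
def decode_all.spec (others : List Obj) (frames : List (Nat × FrameLayout)) (len : Nat) : Spec where
  pre u :=
    ShadowPre others frames u ∧
    u.reg .rdi = 0x200000 ∧
    s32 (u.reg .rsi) = (len : Int) ∧
    len ≤ 0x1FF000 ∧
    u.reg .rdx = 0x400000 ∧
    u.reg .rcx = 0x300000 ∧
    u.reg .r8 = 0x800000 ∧
    s32 (u.reg .r9) = 0x400000 ∧
    Top.FixedLive len others frames ∧
    Top.ArenaFree others ∧
    Consts u.mem
  post _ v :=
    (∃ others' : List Obj, Top.ShadowGrown len others' frames (v.reg .rsp).toNat v.mem) ∧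
    32 ≤ (v.reg .rax).toNat ∧
    (v.reg .rax).toNat ≤ 0x300000
  frame := 6448
  writes _ := [Top.outSpan, Top.harnessArena, Top.shadowAll, Top.crcSpan]

@[vspec] theorem decode_all.spec_frame (others : List Obj) (frames : List (Nat × FrameLayout)) (len : Nat) :
    (decode_all.spec others frames len).frame = 6448 := id rfl

@[vspec] theorem decode_all.spec_writes (others : List Obj) (frames : List (Nat × FrameLayout)) (len : Nat) (u : State) :
    (decode_all.spec others frames len).writes u =
      [⟨0x400000, 0x700000⟩, ⟨0x800000, 0xC00000⟩, ⟨0xC00000, 0xE00000⟩, ⟨0x121c00, 0x122000⟩] := id rfl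

/-! ### 10. `_start_vorbis`: the stub -/

namespace Top

/-- **What the stub needs to know of the state it starts in** (`u` = the start state; every clause is a theorem of
Vorbis/Start.lean / Vorbis/StartShadow.lean about `Vorbis.startU`, or a fact about the image's data — `Final.startOK` in
Vorbis/Spec/Final.lean assembles it). `len` = the length of the input.
  registers    RIP at the entry, RSP = 800000H, DF = 0, the SSE exceptions masked (`start_rip`, `start_reg`, `start_df`, `start_sse_masks`)
  params       the six parameter loads (`start_param`)
  ctor, descs  `.init_array` and the descriptor table of the six globals are in memory (the image's data: `start_image`)
  registered   the shadow layer after `run_ctors`: in any memory `mem'` whose shadow is that of `registerMem mem₁ descs`, for any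
               `mem₁` whose shadow is the start state's (run_ctors is entered after the `call` has pushed its return address):
               IN, OUT and the six globals live, no protected frame, the stack clean below 800000H (`registered_shadowInv`)
  consts       SH7 for `log2_4` and `range_list` (the image's data) -/
structure StartOK (len : Nat) (u : State) : Prop where
  rip : u.rip = L._start_vorbis.entry
  rsp : u.reg .rsp = 0x800000
  inv : abiInv u
  len_le : len ≤ 0x1FF000
  param_in : u.mem.readLE 0x1FF000 8 = 0x200000
  param_len : u.mem.readLE 0x1FF008 8 = len
  param_out : u.mem.readLE 0x1FF010 8 = 0x400000
  param_cap : u.mem.readLE 0x1FF018 8 = 0x300000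
  param_arena : u.mem.readLE 0x1FF030 8 = 0x800000
  param_arena_len : u.mem.readLE 0x1FF038 8 = 0x400000
  ctor : CtorIn u.mem rt.sym
  descs : DescsIn u.mem rt.table rt.descs
  registered : ∀ mem₁ mem' : Mem, Mem.EqOn 0xC00000 0xE00000 u.mem mem₁ →
    Mem.EqOn 0xC00000 0xE00000 (registerMem mem₁ rt.descs) mem' →
    ShadowInv (Vorbis.Globals.objs ++ initialObjs len) [] 0x800000 mem'
  consts : Consts u.mem

end Top

/-- **The statement of `_start_vorbis`** (CONTRACTS 116; c/start.S): it is not a function — nothing calls it, it does not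
return — so its contract is a `ReachVia`, not a `Calls`: from a state `Top.StartOK len u` whose text is that of the reference
state, the machine reaches `vorbis_exit` (the `hlt`, not yet executed), through states that are not at `__asan_report` and are
inside the text. The walk: `call run_ctors` (`runCtorsSpec`: afterwards `StartOK.registered` gives the shadow layer, the parameter
block is outside its footprint), six loads (`StartOK.param_*`), `call decode_all` (its precondition: the six values;
`Top.FixedLive`, `Top.ArenaFree`, `offText` of `Globals.objs ++ initialObjs len` by evaluation), three stores (1FF020H, 3FFFF8H,
1FF028H: inside the layout, unchecked), RIP = `L.exit`. -/
def start_vorbis.Reaches (Lay : Layout) (μ : Microarch) (u₀ : State) : Prop :=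
  ∀ (len : Nat) (u : State), Top.StartOK len u → CodeOK u₀ u.mem →
    ReachVia Lay μ WayInv u (fun v => v.rip = L.exit)

end Vorbis.Spec
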